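-- pv_equiv track=rewrite | github.com/yifancui1/Reversi_py | Reversi/Reversi.py | positionScore
-- ===== SOURCE A (Python) =====
-- def inBound(n, row, col):
--     if row>n-1 or row<0 or col>n-1 or col<0:
--         return False
--     return True
--
-- def opp(colour):
--     if colour == 'W':
--         return 'B'
--     else:
--         return 'W'
--
-- def validInDirection(board, n, row, col, colour, rowDir, colDir):
--     currentRow = row
--     currentCol = col
--     count = 0
--     oppColour = opp(colour)
--     while inBound(n, currentRow+rowDir, currentCol+colDir):
--         currentRow+=rowDir
--         currentCol+=colDir
--         if board[currentRow][currentCol] == oppColour: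
--             count += 1
--         elif board[currentRow][currentCol] == colour:
--             if count>0:
--                 return True
--             else:
--                 return False
--         else:
--             return False
--
-- def validPosition(board, n, row, col, colour):
--     if (not inBound(n, row, col)) or board[row][col] != 'U':
--         return False
--     else:
--         for i in range(-1,2):
--             for j in range(-1,2):
--                 if i != 0 or j != 0:
--                     if validInDirection(board, n, row, col, colour, i, j):
--                         return True
--         return False
--
-- def positionScore(board, n, row, col, colour):
--     tiles=0
--     if not validPosition(board, n, row, col ,colour):
--         return tiles
--     else:
--         for i in range(-1,2):
--             for j in range(-1,2):
--                 if i != 0 or j != 0: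
--                     if validInDirection(board, n, row, col, colour, i, j):
--                         count = 1
--                         while board[row+count*i][col+count*j] != colour and inBound(n,row+count*i,col+count*j):
--                             count += 1
--                             tiles += 1
--         return tiles
-- ===== SOURCE B (Python) =====
-- def inBound(n, row, col):
--     if row > n-1 or row < 0 or col > n-1 or col < 0:
--         return False
--     return True
--
-- def opp(colour):
--     if colour == 'W':
--         return 'B'
--     else:
--         return 'W'
--
-- def positionScore(board, n, row, col, colour):
--     # Scan the whole board for own-colour tiles aligned with the position and
--     # count the opponent tiles strictly between, instead of walking rays.
--     if not inBound(n, row, col) or board[row][col] != 'U':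
--         return 0
--     oc = opp(colour)
--     tiles = 0
--     for r in range(n):
--         for c in range(n):
--             dr = r - row
--             dc = c - col
--             if board[r][c] == colour and (dr, dc) != (0, 0) and (dr == 0 or dc == 0 or abs(dr) == abs(dc)):
--                 d = max(abs(dr), abs(dc))
--                 i = (dr > 0) - (dr < 0)
--                 j = (dc > 0) - (dc < 0)
--                 if d >= 2 and all(board[row + k*i][col + k*j] == oc for k in range(1, d)):
--                     tiles += d - 1
--     return tiles
-- ===== Notes on version B (the rewrite author's own statement) =====
-- stated objective: alternative
-- what changed: A walks rays outward from the placed position three times (validate every direction, re-validate each, then re-walk counting); B never walks rays from the position: it scans every board cell once and, for each cell holding the player's colour that is aligned with the position, checks that all strictly-between cells are opponent tiles and adds the gap length.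
-- outside the precondition, e.g. on positionScore([['B']], 2, 0, 0, 'W'): A returns 0, B returns 0; on positionScore([['U']], 2, 0, 0, 'W'): A raises IndexError, B raises IndexError
import Mathlib
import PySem

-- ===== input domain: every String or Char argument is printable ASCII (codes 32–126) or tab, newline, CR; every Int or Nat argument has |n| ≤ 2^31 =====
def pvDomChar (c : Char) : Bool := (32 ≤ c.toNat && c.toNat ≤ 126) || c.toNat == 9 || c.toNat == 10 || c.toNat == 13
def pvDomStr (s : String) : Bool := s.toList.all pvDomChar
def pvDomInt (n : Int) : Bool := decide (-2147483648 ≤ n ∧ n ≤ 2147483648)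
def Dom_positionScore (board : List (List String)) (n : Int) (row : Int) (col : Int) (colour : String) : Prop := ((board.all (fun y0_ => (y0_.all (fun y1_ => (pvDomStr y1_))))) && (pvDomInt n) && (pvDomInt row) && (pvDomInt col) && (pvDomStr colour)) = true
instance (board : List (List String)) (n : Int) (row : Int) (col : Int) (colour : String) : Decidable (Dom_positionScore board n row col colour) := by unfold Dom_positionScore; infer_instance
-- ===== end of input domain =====

-- B replaces A's outward ray-walking (validate all directions, re-validate, re-walk counting)
-- by a single scan of the whole board that, for every own-colour cell aligned with the
-- position, checks the strictly-between cells are opponent tiles and adds the gap length.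

-- ===== PORT A =====
def inB (n row col : Int) : Bool :=
  if row > n - 1 || row < 0 || col > n - 1 || col < 0 then false else true

def opp (colour : String) : String := if colour == "W" then "B" else "W"

-- total board read (board[r][c]); every read Python actually performs is in range under Pre_
def cellA (board : List (List String)) (r c : Int) : String :=
  PySem.List.pyGetD (PySem.List.pyGetD board r []) c ""

-- the while-loop of validInDirection; fuel n.toNat+1 bounds the ≤ n in-bounds steps, the
-- fuel-0 arm is never reached with that fuel
def vidLoop (board : List (List String)) (n : Int) (colour oc : String) (rd cd : Int) :
    Nat → Int → Int → Int → Bool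
  | 0, _, _, _ => false
  | f + 1, cr, cc, cnt =>
    if inB n (cr + rd) (cc + cd) then
      if cellA board (cr + rd) (cc + cd) == oc then
        vidLoop board n colour oc rd cd f (cr + rd) (cc + cd) (cnt + 1)
      else if cellA board (cr + rd) (cc + cd) == colour then decide (cnt > 0)
      else false
    else false

def validInDirection (board : List (List String)) (n row col : Int) (colour : String)
    (rd cd : Int) : Bool :=
  vidLoop board n colour (opp colour) rd cd (n.toNat + 1) row col 0

def validPosition (board : List (List String)) (n row col : Int) (colour : String) : Bool :=
  if !(inB n row col) || (cellA board row col != "U") then false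
  else (PySem.List.pyRange (-1) 2 1).any (fun i =>
    (PySem.List.pyRange (-1) 2 1).any (fun j =>
      (i != 0 || j != 0) && validInDirection board n row col colour i j))

-- the inner re-walk while-loop of positionScore (count/tiles); same fuel remark as vidLoop
def rwLoop (board : List (List String)) (n : Int) (colour : String) (row col rd cd : Int) :
    Nat → Int → Int → Int
  | 0, _, tiles => tiles
  | f + 1, cnt, tiles =>
    if (cellA board (row + cnt * rd) (col + cnt * cd) != colour) &&
       inB n (row + cnt * rd) (col + cnt * cd)
    then rwLoop board n colour row col rd cd f (cnt + 1) (tiles + 1)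
    else tiles

def positionScore (board : List (List String)) (n : Int) (row : Int) (col : Int) (colour : String) : Int :=
  let tiles : Int := 0
  if !(validPosition board n row col colour) then tiles
  else
    (PySem.List.pyRange (-1) 2 1).foldl (fun tiles i =>
      (PySem.List.pyRange (-1) 2 1).foldl (fun tiles j =>
        if i != 0 || j != 0 then
          if validInDirection board n row col colour i j then
            rwLoop board n colour row col i j (n.toNat + 1) 1 tiles
          else tiles
        else tiles) tiles) tiles

-- ===== PORT B =====
-- grid scan: for every aligned own-colour cell, count the opponent tiles strictly between
def positionScore_alt (board : List (List String)) (n : Int) (row : Int) (col : Int) (colour : String) : Int :=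
  if !(inB n row col) || (cellA board row col != "U") then 0
  else
    let oc := opp colour
    (PySem.List.pyRange 0 n 1).foldl (fun tiles r =>
      (PySem.List.pyRange 0 n 1).foldl (fun tiles c =>
        let dr := r - row
        let dc := c - col
        if (cellA board r c == colour) && !(dr == 0 && dc == 0) &&
           ((dr == 0) || (dc == 0) || (|dr| == |dc|)) then
          let d := max |dr| |dc|
          let i := (if dr > 0 then (1 : Int) else 0) - (if dr < 0 then 1 else 0)
          let j := (if dc > 0 then (1 : Int) else 0) - (if dc < 0 then 1 else 0)
          if decide (2 ≤ d) &&
             (PySem.List.pyRange 1 d 1).all (fun k =>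
               cellA board (row + k * i) (col + k * j) == oc)
          then tiles + (d - 1) else tiles
        else tiles) tiles) 0

-- ===== PRECONDITION & SPEC =====
-- Pre_ excludes inputs where the probed square is on the n×n grid but the board list is
-- smaller than n×n, on which Python A can raise IndexError.
def Pre_positionScore (board : List (List String)) (n : Int) (row : Int) (col : Int) (_colour : String) : Prop :=
  inB n row col = true → (n ≤ (board.length : Int) ∧ ∀ r ∈ board, n ≤ (r.length : Int))

instance (board : List (List String)) (n : Int) (row : Int) (col : Int) (colour : String) : Decidable (Pre_positionScore board n row col colour) := by
  unfold Pre_positionScore; infer_instance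

def pvWitness_positionScore : List (List String) × Int × Int × Int × String :=
  ([["U", "B", "W"], ["B", "B", "B"], ["W", "B", "U"]], 3, 0, 0, "W")

def Spec_positionScore (board : List (List String)) (n : Int) (row : Int) (col : Int) (colour : String) (out : Int) : Prop := out = positionScore_alt board n row col colour
instance (board : List (List String)) (n : Int) (row : Int) (col : Int) (colour : String) (out : Int) : Decidable (Spec_positionScore board n row col colour out) := by unfold Spec_positionScore; infer_instance

-- ===== CLAIM (what is proved, stated in full; the proofs are below) =====
def Claim_equal_positionScore : Prop := ∀ (board : List (List String)) (n : Int) (row : Int) (col : Int) (colour : String), Dom_positionScore board n row col colour → Pre_positionScore board n row col colour → Spec_positionScore board n row col colour (positionScore board n row col colour)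

-- ===== LEMMAS AND PROOFS =====

-- proof-side objects: the eight directions, a one-pass ray walk, per-direction contribution
def dirs8 : List (Int × Int) :=
  [(-1, -1), (-1, 0), (-1, 1), (0, -1), (0, 1), (1, -1), (1, 0), (1, 1)]

def runLoop (board : List (List String)) (n : Int) (oc : String) (rd cd : Int) :
    Nat → Int → Int → Int → Int × Int × Int
  | 0, r, c, _ => (-1, r, c)
  | f + 1, r, c, run =>
    if inB n r c && (cellA board r c == oc) then
      runLoop board n oc rd cd f (r + rd) (c + cd) (run + 1)
    else (run, r, c)

def contribD (board : List (List String)) (n row col : Int) (colour : String) (p : Int × Int) : Int :=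
  let w := runLoop board n (opp colour) p.1 p.2 (n.toNat + 1) (row + p.1) (col + p.2) 0
  if decide (w.1 > 0) && inB n w.2.1 w.2.2 && (cellA board w.2.1 w.2.2 == colour)
  then w.1 else 0

-- the middle form both ports are reduced to: A's fold reorganised over dirs8
def midScore (board : List (List String)) (n row col : Int) (colour : String) : Int :=
  if !(inB n row col) || (cellA board row col != "U") then 0
  else
    dirs8.foldl (fun tiles d =>
      let w := runLoop board n (opp colour) d.1 d.2 (n.toNat + 1) (row + d.1) (col + d.2) 0
      if decide (w.1 > 0) && inB n w.2.1 w.2.2 && (cellA board w.2.1 w.2.2 == colour)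
      then tiles + w.1 else tiles) 0

-- per-cell value of B's inner loop body (lets of the port inlined)
def gcell (board : List (List String)) (row col : Int) (colour : String) (r c : Int) : Int :=
  if (cellA board r c == colour) && !((r - row) == 0 && (c - col) == 0) &&
     (((r - row) == 0) || ((c - col) == 0) || (|r - row| == |c - col|)) then
    if decide (2 ≤ max |r - row| |c - col|) &&
       (PySem.List.pyRange 1 (max |r - row| |c - col|) 1).all (fun k =>
         cellA board (row + k * ((if r - row > 0 then (1 : Int) else 0) - (if r - row < 0 then 1 else 0)))
                     (col + k * ((if c - col > 0 then (1 : Int) else 0) - (if c - col < 0 then 1 else 0))) == opp colour)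
    then max |r - row| |c - col| - 1 else 0
  else 0

-- the share of cell (r,c) attributed to direction p
def hcell (board : List (List String)) (row col : Int) (colour : String) (p : Int × Int) (r c : Int) : Int :=
  if r = row + (max |r - row| |c - col|) * p.1 ∧ c = col + (max |r - row| |c - col|) * p.2 ∧
     2 ≤ max |r - row| |c - col| ∧ cellA board r c = colour ∧
     (PySem.List.pyRange 1 (max |r - row| |c - col|) 1).all (fun k =>
       cellA board (row + k * p.1) (col + k * p.2) == opp colour) = true
  then max |r - row| |c - col| - 1 else 0

-- "direction (i,j) flips exactly k tiles": k ≥ 1 opponent tiles then an own tile, in bounds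
def SuccP (board : List (List String)) (n row col : Int) (colour : String) (i j k : Int) : Prop :=
  1 ≤ k ∧
  (∀ t, 1 ≤ t → t ≤ k → inB n (row + t * i) (col + t * j) = true ∧
      cellA board (row + t * i) (col + t * j) = opp colour) ∧
  inB n (row + (k + 1) * i) (col + (k + 1) * j) = true ∧
  cellA board (row + (k + 1) * i) (col + (k + 1) * j) = colour

lemma opp_ne (colour : String) : opp colour ≠ colour := by
  unfold opp; split <;> intro e <;> simp_all

lemma pyRange_m1 : PySem.List.pyRange (-1) 2 1 = [-1, 0, 1] := by decide

lemma inB_iff (n r c : Int) : inB n r c = true ↔ (0 ≤ r ∧ r < n ∧ 0 ≤ c ∧ c < n) := by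
  unfold inB; split_ifs with h <;> simp_all <;> omega

-- generic list-sum helpers
lemma map_sum_congr {α : Type} (L : List α) (f g : α → Int) (h : ∀ x ∈ L, f x = g x) :
    (L.map f).sum = (L.map g).sum := by
  rw [List.map_congr_left h]

lemma sum_zero' {α : Type} (L : List α) (f : α → Int) (h : ∀ x ∈ L, f x = 0) :
    (L.map f).sum = 0 := by
  rw [map_sum_congr L f (fun _ => 0) h]; simp

lemma sum_add' {α : Type} (L : List α) (f g : α → Int) :
    (L.map (fun x => f x + g x)).sum = (L.map f).sum + (L.map g).sum := by
  induction L with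
  | nil => simp
  | cons a L ih => simp [ih]; ring

lemma sum_single {α : Type} [DecidableEq α] (L : List α) (f : α → Int) (x₀ : α)
    (hmem : x₀ ∈ L) (hnd : L.Nodup) (h0 : ∀ x ∈ L, x ≠ x₀ → f x = 0) :
    (L.map f).sum = f x₀ := by
  induction L with
  | nil => cases hmem
  | cons a L ih =>
    rcases List.mem_cons.mp hmem with rfl | hm
    · have : (L.map f).sum = 0 := by
        apply sum_zero'
        intro x hx
        exact h0 x (List.mem_cons_of_mem _ hx) (by rintro rfl; exact (List.nodup_cons.mp hnd).1 hx)
      simp [this]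
    · have ha : f a = 0 := h0 a (List.mem_cons_self) (by rintro rfl; exact (List.nodup_cons.mp hnd).1 hm)
      have := ih hm (List.nodup_cons.mp hnd).2 (fun x hx hne => h0 x (List.mem_cons_of_mem _ hx) hne)
      simp [ha, this]

lemma sum_comm' {α β : Type} (L : List α) (M : List β) (f : α → β → Int) :
    (L.map (fun x => (M.map (fun y => f x y)).sum)).sum
      = (M.map (fun y => (L.map (fun x => f x y)).sum)).sum := by
  induction L with
  | nil =>
    symm
    apply sum_zero'
    intro y _
    simp
  | cons a L ih =>
    simp only [List.map_cons, List.sum_cons, ih]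
    rw [← sum_add']

lemma foldl_abs {β : Type} (L : List β) (F : Int → β → Int) (g : β → Int)
    (h : ∀ t x, F t x = t + g x) : ∀ t, L.foldl F t = t + (L.map g).sum := by
  induction L with
  | nil => intro t; simp
  | cons a L ih => intro t; simp only [List.foldl_cons, List.map_cons, List.sum_cons, h, ih]; ring

-- ===== A-side: A equals midScore =====

lemma vid_eq_run (board : List (List String)) (n : Int) (colour oc : String) (rd cd : Int) :
    ∀ (f : Nat) (cr cc cnt : Int),
      vidLoop board n colour oc rd cd f cr cc cnt =
        (decide ((runLoop board n oc rd cd f (cr + rd) (cc + cd) cnt).1 > 0) &&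
         inB n (runLoop board n oc rd cd f (cr + rd) (cc + cd) cnt).2.1
               (runLoop board n oc rd cd f (cr + rd) (cc + cd) cnt).2.2 &&
         (cellA board (runLoop board n oc rd cd f (cr + rd) (cc + cd) cnt).2.1
                      (runLoop board n oc rd cd f (cr + rd) (cc + cd) cnt).2.2 == colour)) := by
  intro f
  induction f with
  | zero => intro cr cc cnt; simp [vidLoop, runLoop]
  | succ f ih =>
    intro cr cc cnt
    rcases Bool.eq_false_or_eq_true (inB n (cr + rd) (cc + cd)) with hb | hb
    · rcases Bool.eq_false_or_eq_true (cellA board (cr + rd) (cc + cd) == oc) with hc | hc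
      · have hl : vidLoop board n colour oc rd cd (f + 1) cr cc cnt
            = vidLoop board n colour oc rd cd f (cr + rd) (cc + cd) (cnt + 1) := by
          simp [vidLoop, hb, hc]
        have hr : runLoop board n oc rd cd (f + 1) (cr + rd) (cc + cd) cnt
            = runLoop board n oc rd cd f (cr + rd + rd) (cc + cd + cd) (cnt + 1) := by
          simp [runLoop, hb, hc]
        rw [hl, hr]
        exact ih (cr + rd) (cc + cd) (cnt + 1)
      · have hr : runLoop board n oc rd cd (f + 1) (cr + rd) (cc + cd) cnt
            = (cnt, cr + rd, cc + cd) := by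
          simp [runLoop, hc]
        rcases Bool.eq_false_or_eq_true (cellA board (cr + rd) (cc + cd) == colour) with hcol | hcol
        · have hl : vidLoop board n colour oc rd cd (f + 1) cr cc cnt = decide (cnt > 0) := by
            simp [vidLoop, hb, hc, hcol]
          rw [hl, hr]; simp [hb, hcol]
        · have hl : vidLoop board n colour oc rd cd (f + 1) cr cc cnt = false := by
            simp [vidLoop, hb, hc, hcol]
          rw [hl, hr]; simp [hcol]
    · have hl : vidLoop board n colour oc rd cd (f + 1) cr cc cnt = false := by
        simp [vidLoop, hb]
      have hr : runLoop board n oc rd cd (f + 1) (cr + rd) (cc + cd) cnt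
          = (cnt, cr + rd, cc + cd) := by
        simp [runLoop, hb]
      rw [hl, hr]; simp [hb]

lemma rw_of_run (board : List (List String)) (n : Int) (colour oc : String)
    (hoc : oc ≠ colour) (row col rd cd : Int) :
    ∀ (f : Nat) (cnt run0 tiles : Int),
      (runLoop board n oc rd cd f (row + cnt * rd) (col + cnt * cd) run0).1 > 0 →
      inB n (runLoop board n oc rd cd f (row + cnt * rd) (col + cnt * cd) run0).2.1
            (runLoop board n oc rd cd f (row + cnt * rd) (col + cnt * cd) run0).2.2 = true →
      cellA board (runLoop board n oc rd cd f (row + cnt * rd) (col + cnt * cd) run0).2.1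
                  (runLoop board n oc rd cd f (row + cnt * rd) (col + cnt * cd) run0).2.2 = colour →
      rwLoop board n colour row col rd cd f cnt tiles =
        tiles + (runLoop board n oc rd cd f (row + cnt * rd) (col + cnt * cd) run0).1 - run0 := by
  intro f
  induction f with
  | zero =>
    intro cnt run0 tiles h1 _ _
    simp [runLoop] at h1
  | succ f ih =>
    intro cnt run0 tiles h1 h2 h3
    rcases Bool.eq_false_or_eq_true (inB n (row + cnt * rd) (col + cnt * cd)) with hb | hb
    · rcases Bool.eq_false_or_eq_true (cellA board (row + cnt * rd) (col + cnt * cd) == oc) with hc | hc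
      · have hcell : cellA board (row + cnt * rd) (col + cnt * cd) = oc := by
          simpa using hc
        have e1 : row + cnt * rd + rd = row + (cnt + 1) * rd := by ring
        have e2 : col + cnt * cd + cd = col + (cnt + 1) * cd := by ring
        have hr : runLoop board n oc rd cd (f + 1) (row + cnt * rd) (col + cnt * cd) run0
            = runLoop board n oc rd cd f (row + (cnt + 1) * rd) (col + (cnt + 1) * cd) (run0 + 1) := by
          rw [← e1, ← e2]; simp [runLoop, hb, hc]
        rw [hr] at h1 h2 h3 ⊢
        have hne : (cellA board (row + cnt * rd) (col + cnt * cd) != colour) = true := by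
          simp [hcell, hoc]
        have hl : rwLoop board n colour row col rd cd (f + 1) cnt tiles
            = rwLoop board n colour row col rd cd f (cnt + 1) (tiles + 1) := by
          simp [rwLoop, hne, hb]
        rw [hl, ih (cnt + 1) (run0 + 1) (tiles + 1) h1 h2 h3]
        omega
      · have hr : runLoop board n oc rd cd (f + 1) (row + cnt * rd) (col + cnt * cd) run0
            = (run0, row + cnt * rd, col + cnt * cd) := by
          simp [runLoop, hc]
        rw [hr] at h1 h3
        simp only at h1 h3
        have hne : (cellA board (row + cnt * rd) (col + cnt * cd) != colour) = false := by
          simp [h3]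
        have hl : rwLoop board n colour row col rd cd (f + 1) cnt tiles = tiles := by
          simp [rwLoop, hne]
        rw [hl, hr]
        simp
    · have hr : runLoop board n oc rd cd (f + 1) (row + cnt * rd) (col + cnt * cd) run0
          = (run0, row + cnt * rd, col + cnt * cd) := by
        simp [runLoop, hb]
      rw [hr] at h2
      simp [hb] at h2

lemma contribB_eq (board : List (List String)) (n row col : Int) (colour : String)
    (rd cd tiles : Int) :
    (if decide ((runLoop board n (opp colour) rd cd (n.toNat + 1) (row + rd) (col + cd) 0).1 > 0) &&
        inB n (runLoop board n (opp colour) rd cd (n.toNat + 1) (row + rd) (col + cd) 0).2.1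
              (runLoop board n (opp colour) rd cd (n.toNat + 1) (row + rd) (col + cd) 0).2.2 &&
        (cellA board (runLoop board n (opp colour) rd cd (n.toNat + 1) (row + rd) (col + cd) 0).2.1
                     (runLoop board n (opp colour) rd cd (n.toNat + 1) (row + rd) (col + cd) 0).2.2 == colour)
     then tiles + (runLoop board n (opp colour) rd cd (n.toNat + 1) (row + rd) (col + cd) 0).1
     else tiles)
    = (if validInDirection board n row col colour rd cd
       then rwLoop board n colour row col rd cd (n.toNat + 1) 1 tiles else tiles) := by
  rw [validInDirection, vid_eq_run board n colour (opp colour) rd cd (n.toNat + 1) row col 0]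
  rcases Bool.eq_false_or_eq_true
      (decide ((runLoop board n (opp colour) rd cd (n.toNat + 1) (row + rd) (col + cd) 0).1 > 0) &&
       inB n (runLoop board n (opp colour) rd cd (n.toNat + 1) (row + rd) (col + cd) 0).2.1
             (runLoop board n (opp colour) rd cd (n.toNat + 1) (row + rd) (col + cd) 0).2.2 &&
       (cellA board (runLoop board n (opp colour) rd cd (n.toNat + 1) (row + rd) (col + cd) 0).2.1
                    (runLoop board n (opp colour) rd cd (n.toNat + 1) (row + rd) (col + cd) 0).2.2 == colour)) with hcond | hcond
  case inr => simp only [hcond, Bool.false_eq_true, if_false]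
  case inl =>
    simp only [hcond, if_true]
    simp only [Bool.and_eq_true, decide_eq_true_eq, beq_iff_eq] at hcond
    have e1 : row + 1 * rd = row + rd := by ring
    have e2 : col + 1 * cd = col + cd := by ring
    have h := rw_of_run board n colour (opp colour) (opp_ne colour) row col rd cd
      (n.toNat + 1) 1 0 tiles (by rw [e1, e2]; exact hcond.1.1) (by rw [e1, e2]; exact hcond.1.2)
      (by rw [e1, e2]; exact hcond.2)
    rw [e1, e2] at h
    rw [h]
    omega

lemma ite_eq_else (c : Bool) (X : Int) (h : c = true → X = 0) :
    (if c then 0 else X) = X := by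
  cases c
  · rfl
  · simp [h rfl]

set_option maxHeartbeats 2000000 in
lemma A_eq_mid (board : List (List String)) (n row col : Int) (colour : String) :
    positionScore board n row col colour = midScore board n row col colour := by
  unfold positionScore midScore validPosition
  rw [pyRange_m1]
  rcases Bool.eq_false_or_eq_true (!(inB n row col) || (cellA board row col != "U")) with hg | hg
  · simp [hg]
  · simp only [hg, Bool.false_eq_true, if_false]
    have d1 : ((-1 : Int) != 0) = true := by decide
    have d2 : ((0 : Int) != 0) = false := by decide
    have d3 : ((1 : Int) != 0) = true := by decide
    simp only [dirs8, List.foldl, List.any, d1, d2, d3, Bool.or_true, Bool.false_or,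
      Bool.or_false, Bool.or_self, Bool.true_and, Bool.false_and, Bool.false_eq_true,
      if_true, if_false]
    rw [contribB_eq, contribB_eq, contribB_eq, contribB_eq, contribB_eq, contribB_eq,
      contribB_eq, contribB_eq]
    apply ite_eq_else
    intro hv
    simp only [Bool.not_eq_true', Bool.or_eq_false_iff] at hv
    simp_all

-- ===== walk characterisation =====

lemma inB_false_of (n r c : Int) (h : ¬(0 ≤ r ∧ r < n ∧ 0 ≤ c ∧ c < n)) :
    inB n r c = false :=
  Bool.eq_false_iff.mpr (fun hbe => h ((inB_iff n r c).mp hbe))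

lemma mem_dirs8 (i j : Int) (hij : (i, j) ∈ dirs8) :
    (i = -1 ∨ i = 0 ∨ i = 1) ∧ (j = -1 ∨ j = 0 ∨ j = 1) ∧ ¬(i = 0 ∧ j = 0) := by
  simp only [dirs8, List.mem_cons, List.not_mem_nil, or_false, Prod.mk.injEq] at hij
  rcases hij with ⟨rfl, rfl⟩ | ⟨rfl, rfl⟩ | ⟨rfl, rfl⟩ | ⟨rfl, rfl⟩ | ⟨rfl, rfl⟩ | ⟨rfl, rfl⟩ | ⟨rfl, rfl⟩ | ⟨rfl, rfl⟩ <;> norm_num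

lemma inB_far (n row col i j t : Int) (hij : (i, j) ∈ dirs8) (hg : inB n row col = true)
    (ht : n ≤ t) : inB n (row + t * i) (col + t * j) = false := by
  rw [inB_iff] at hg
  obtain ⟨hi, hj, hnz⟩ := mem_dirs8 i j hij
  apply inB_false_of
  rcases hi with rfl | rfl | rfl <;> rcases hj with rfl | rfl | rfl <;> intro hb <;> omega

lemma inB_seg (n row col i j d t : Int) (hij : (i, j) ∈ dirs8)
    (hg : inB n row col = true) (hd : inB n (row + d * i) (col + d * j) = true)
    (h0 : 0 ≤ t) (htd : t ≤ d) : inB n (row + t * i) (col + t * j) = true := by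
  rw [inB_iff] at hg hd ⊢
  obtain ⟨hi, hj, hnz⟩ := mem_dirs8 i j hij
  rcases hi with rfl | rfl | rfl <;> rcases hj with rfl | rfl | rfl <;> omega

lemma runLoop_ext (board : List (List String)) (n row col : Int) (oc : String) (i j : Int)
    (hij : (i, j) ∈ dirs8) (hg : inB n row col = true) :
    ∀ (f : Nat) (m : Int), 1 ≤ m → ((n.toNat : Int) + 2 ≤ (f : Int) + m) →
      inB n (row + (m - 1) * i) (col + (m - 1) * j) = true →
      ∃ k : Int, m - 1 ≤ k ∧
        runLoop board n oc i j f (row + m * i) (col + m * j) (m - 1)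
          = (k, row + (k + 1) * i, col + (k + 1) * j) ∧
        (∀ t, m ≤ t → t ≤ k → inB n (row + t * i) (col + t * j) = true ∧
            cellA board (row + t * i) (col + t * j) = oc) ∧
        ¬(inB n (row + (k + 1) * i) (col + (k + 1) * j) = true ∧
          cellA board (row + (k + 1) * i) (col + (k + 1) * j) = oc) := by
  intro f
  induction f with
  | zero =>
    intro m hm hfuel hprev
    exfalso
    have hnm : n ≤ m - 1 := by
      have h1 : (n : Int) ≤ (n.toNat : Int) := Int.self_le_toNat n
      push_cast at hfuel
      omega
    rw [inB_far n row col i j (m - 1) hij hg hnm] at hprev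
    exact Bool.false_ne_true hprev
  | succ f ih =>
    intro m hm hfuel hprev
    by_cases hcond : (inB n (row + m * i) (col + m * j) &&
        (cellA board (row + m * i) (col + m * j) == oc)) = true
    · obtain ⟨hb, hc⟩ := (Bool.and_eq_true _ _).mp hcond
      have hc' : cellA board (row + m * i) (col + m * j) = oc := by simpa using hc
      have e1 : row + m * i + i = row + (m + 1) * i := by ring
      have e2 : col + m * j + j = col + (m + 1) * j := by ring
      have e3 : m - 1 + 1 = m + 1 - 1 := by ring
      have hstep : runLoop board n oc i j (f + 1) (row + m * i) (col + m * j) (m - 1)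
          = runLoop board n oc i j f (row + (m + 1) * i) (col + (m + 1) * j) (m + 1 - 1) := by
        rw [runLoop, if_pos hcond, e1, e2, e3]
      have e4 : m + 1 - 1 = m := by ring
      obtain ⟨k, hk1, hk2, hk3, hk4⟩ := ih (m + 1) (by omega)
        (by push_cast at hfuel ⊢; omega) (by rw [e4]; exact hb)
      refine ⟨k, by omega, by rw [hstep]; exact hk2, ?_, hk4⟩
      intro t ht1 ht2
      rcases eq_or_lt_of_le ht1 with rfl | hlt
      · exact ⟨hb, hc'⟩
      · exact hk3 t (by omega) ht2
    · have hcond' : (inB n (row + m * i) (col + m * j) &&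
          (cellA board (row + m * i) (col + m * j) == oc)) = false :=
        Bool.eq_false_iff.mpr hcond
      have e1 : m - 1 + 1 = m := by ring
      refine ⟨m - 1, le_refl _, ?_, ?_, ?_⟩
      · rw [runLoop, if_neg (by rw [hcond']; exact Bool.false_ne_true), e1]
      · intro t ht1 ht2; omega
      · rw [e1]
        rintro ⟨h1, h2⟩
        rw [Bool.and_eq_false_iff] at hcond'
        rcases hcond' with h | h
        · rw [h1] at h; exact Bool.false_ne_true h.symm
        · rw [beq_eq_false_iff_ne] at h; exact h h2

lemma succ_unique (board : List (List String)) (n row col : Int) (colour : String)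
    (i j k k' : Int) (h : SuccP board n row col colour i j k)
    (h' : SuccP board n row col colour i j k') : k = k' := by
  obtain ⟨hk1, hk2, hk3, hk4⟩ := h
  obtain ⟨hk1', hk2', hk3', hk4'⟩ := h'
  rcases lt_trichotomy k k' with hlt | heq | hlt
  · exfalso
    have := (hk2' (k + 1) (by omega) (by omega)).2
    rw [hk4] at this
    exact opp_ne colour this.symm
  · exact heq
  · exfalso
    have := (hk2 (k' + 1) (by omega) (by omega)).2
    rw [hk4'] at this
    exact opp_ne colour this.symm

lemma contrib_of_succ (board : List (List String)) (n row col : Int) (colour : String)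
    (p : Int × Int) (hp : p ∈ dirs8) (hg : inB n row col = true) (k : Int)
    (hs : SuccP board n row col colour p.1 p.2 k) :
    contribD board n row col colour p = k := by
  have e0i : row + (1 - 1) * p.1 = row := by ring
  have e0j : col + (1 - 1) * p.2 = col := by ring
  obtain ⟨K, hK1, hK2, hK3, hK4⟩ := runLoop_ext board n row col (opp colour) p.1 p.2
    (by simpa using hp) hg (n.toNat + 1) 1 (by omega)
    (by push_cast; omega) (by rw [e0i, e0j]; exact hg)
  obtain ⟨hk1, hk2, hk3, hk4⟩ := hs
  have hKk : K = k := by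
    rcases lt_trichotomy K k with hlt | heq | hlt
    · exfalso
      exact hK4 ⟨(hk2 (K + 1) (by omega) (by omega)).1, (hk2 (K + 1) (by omega) (by omega)).2⟩
    · exact heq
    · exfalso
      have := (hK3 (k + 1) (by omega) (by omega)).2
      rw [hk4] at this
      exact opp_ne colour this.symm
  have e1 : row + 1 * p.1 = row + p.1 := by ring
  have e2 : col + 1 * p.2 = col + p.2 := by ring
  rw [e1, e2] at hK2
  norm_num at hK2
  unfold contribD
  simp only [hK2]
  simp only [hKk]
  rw [if_pos]
  simp only [Bool.and_eq_true, decide_eq_true_eq, beq_iff_eq]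
  exact ⟨⟨by omega, hk3⟩, hk4⟩

lemma succ_of_contrib_ne (board : List (List String)) (n row col : Int) (colour : String)
    (p : Int × Int) (hp : p ∈ dirs8) (hg : inB n row col = true)
    (h : contribD board n row col colour p ≠ 0) :
    ∃ k, SuccP board n row col colour p.1 p.2 k := by
  have e0i : row + (1 - 1) * p.1 = row := by ring
  have e0j : col + (1 - 1) * p.2 = col := by ring
  obtain ⟨K, hK1, hK2, hK3, hK4⟩ := runLoop_ext board n row col (opp colour) p.1 p.2
    (by simpa using hp) hg (n.toNat + 1) 1 (by omega)
    (by push_cast; omega) (by rw [e0i, e0j]; exact hg)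
  have e1 : row + 1 * p.1 = row + p.1 := by ring
  have e2 : col + 1 * p.2 = col + p.2 := by ring
  rw [e1, e2] at hK2
  norm_num at hK2
  unfold contribD at h
  simp only [hK2] at h
  by_cases hcond : (decide (K > 0) && inB n (row + (K + 1) * p.1) (col + (K + 1) * p.2) &&
      (cellA board (row + (K + 1) * p.1) (col + (K + 1) * p.2) == colour)) = true
  · simp only [Bool.and_eq_true, decide_eq_true_eq, beq_iff_eq] at hcond
    exact ⟨K, by omega, fun t ht1 ht2 => hK3 t ht1 ht2, hcond.1.2, hcond.2⟩
  · exfalso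
    apply h
    rw [if_neg (by rw [Bool.eq_false_iff.mpr hcond]; exact Bool.false_ne_true)]

-- ===== B-side: per-direction share sums to the contribution =====

lemma hcell_succ (board : List (List String)) (n row col : Int) (colour : String)
    (p : Int × Int) (hp : p ∈ dirs8) (hg : inB n row col = true) (r c : Int)
    (hr0 : 0 ≤ r) (hr1 : r < n) (hc0 : 0 ≤ c) (hc1 : c < n)
    (h : hcell board row col colour p r c ≠ 0) :
    ∃ k, SuccP board n row col colour p.1 p.2 k ∧ r = row + (k + 1) * p.1 ∧
      c = col + (k + 1) * p.2 ∧ hcell board row col colour p r c = k := by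
  unfold hcell at h ⊢
  by_cases hcond : (r = row + (max |r - row| |c - col|) * p.1 ∧
      c = col + (max |r - row| |c - col|) * p.2 ∧ 2 ≤ max |r - row| |c - col| ∧
      cellA board r c = colour ∧
      (PySem.List.pyRange 1 (max |r - row| |c - col|) 1).all (fun k =>
        cellA board (row + k * p.1) (col + k * p.2) == opp colour) = true)
  case neg => exact absurd (if_neg hcond) h
  case pos =>
    obtain ⟨h1, h2, h3, h4, h5⟩ := hcond
    set d := max |r - row| |c - col| with hdDef
    have hd_inB : inB n (row + d * p.1) (col + d * p.2) = true := by
      rw [← h1, ← h2, inB_iff]; exact ⟨hr0, hr1, hc0, hc1⟩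
    have e : d - 1 + 1 = d := by ring
    refine ⟨d - 1, ⟨by omega, ?_, ?_, ?_⟩, by rw [e, h1], by rw [e, h2], ?_⟩
    · intro t ht1 ht2
      refine ⟨inB_seg n row col p.1 p.2 d t hp hg hd_inB (by omega) (by omega), ?_⟩
      have := List.all_eq_true.mp h5 t (PySem.List.mem_pyRange_one.mpr ⟨by omega, by omega⟩)
      simpa using this
    · rw [e]; exact hd_inB
    · rw [e, ← h1, ← h2]; exact h4
    · rw [if_pos ⟨h1, h2, h3, h4, h5⟩]

lemma hot_val (board : List (List String)) (n row col : Int) (colour : String)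
    (p : Int × Int) (hp : p ∈ dirs8) (k : Int)
    (hs : SuccP board n row col colour p.1 p.2 k) :
    hcell board row col colour p (row + (k + 1) * p.1) (col + (k + 1) * p.2) = k := by
  obtain ⟨hk1, hk2, hk3, hk4⟩ := hs
  obtain ⟨hi, hj, hnz⟩ := mem_dirs8 p.1 p.2 (by simpa using hp)
  have e1 : row + (k + 1) * p.1 - row = (k + 1) * p.1 := by ring
  have e2 : col + (k + 1) * p.2 - col = (k + 1) * p.2 := by ring
  have hd : max |row + (k + 1) * p.1 - row| |col + (k + 1) * p.2 - col| = k + 1 := by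
    rw [e1, e2]
    rcases hi with h | h | h <;> rcases hj with h' | h' | h' <;> rw [h, h'] <;>
      simp only [Int.abs_eq_natAbs] <;> omega
  unfold hcell
  rw [hd, if_pos]
  · ring
  refine ⟨rfl, rfl, by omega, hk4, List.all_eq_true.mpr ?_⟩
  intro t ht
  obtain ⟨ht1, ht2⟩ := PySem.List.mem_pyRange_one.mp ht
  simpa using (hk2 t ht1 (by omega)).2

lemma dir_sum (board : List (List String)) (n row col : Int) (colour : String)
    (p : Int × Int) (hp : p ∈ dirs8) (hg : inB n row col = true) :
    ((PySem.List.pyRange 0 n 1).map (fun r =>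
      ((PySem.List.pyRange 0 n 1).map (fun c => hcell board row col colour p r c)).sum)).sum
      = contribD board n row col colour p := by
  by_cases hz : contribD board n row col colour p = 0
  · rw [hz]
    apply sum_zero'
    intro r hr
    apply sum_zero'
    intro c hc
    obtain ⟨hr0, hr1⟩ := PySem.List.mem_pyRange_one.mp hr
    obtain ⟨hc0, hc1⟩ := PySem.List.mem_pyRange_one.mp hc
    by_contra hne
    obtain ⟨k, hs, _, _, _⟩ := hcell_succ board n row col colour p hp hg r c hr0 hr1 hc0 hc1 hne
    rw [contrib_of_succ board n row col colour p hp hg k hs] at hz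
    exact absurd hz (by have := hs.1; omega)
  · obtain ⟨k, hs⟩ := succ_of_contrib_ne board n row col colour p hp hg hz
    rw [contrib_of_succ board n row col colour p hp hg k hs]
    obtain ⟨hr0', hr1', hc0', hc1'⟩ := (inB_iff _ _ _).mp hs.2.2.1
    rw [sum_single (PySem.List.pyRange 0 n 1) _ (row + (k + 1) * p.1)
      (PySem.List.mem_pyRange_one.mpr ⟨hr0', hr1'⟩) (PySem.List.nodup_pyRange_one _ _) ?_]
    · rw [sum_single (PySem.List.pyRange 0 n 1) _ (col + (k + 1) * p.2)
        (PySem.List.mem_pyRange_one.mpr ⟨hc0', hc1'⟩) (PySem.List.nodup_pyRange_one _ _) ?_]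
      · exact hot_val board n row col colour p hp k hs
      · intro c hc hneq
        obtain ⟨hc0, hc1⟩ := PySem.List.mem_pyRange_one.mp hc
        by_contra hne
        obtain ⟨k', hs', _, hce, _⟩ := hcell_succ board n row col colour p hp hg
          (row + (k + 1) * p.1) c hr0' hr1' hc0 hc1 hne
        rw [succ_unique board n row col colour p.1 p.2 k k' hs hs'] at hneq
        exact hneq hce
    · intro r hr hneq
      obtain ⟨hr0, hr1⟩ := PySem.List.mem_pyRange_one.mp hr
      apply sum_zero'
      intro c hc
      obtain ⟨hc0, hc1⟩ := PySem.List.mem_pyRange_one.mp hc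
      by_contra hne
      obtain ⟨k', hs', hre, _, _⟩ := hcell_succ board n row col colour p hp hg
        r c hr0 hr1 hc0 hc1 hne
      rw [succ_unique board n row col colour p.1 p.2 k k' hs hs'] at hneq
      exact hneq hre

-- ===== pointwise: a cell's value splits over the 8 directions =====

lemma align_repr (dr dc : Int) (hnz : ¬(dr = 0 ∧ dc = 0)) (hal : dr = 0 ∨ dc = 0 ∨ |dr| = |dc|) :
    1 ≤ max |dr| |dc| ∧
    dr = (max |dr| |dc|) * ((if dr > 0 then (1 : Int) else 0) - (if dr < 0 then 1 else 0)) ∧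
    dc = (max |dr| |dc|) * ((if dc > 0 then (1 : Int) else 0) - (if dc < 0 then 1 else 0)) ∧
    (((if dr > 0 then (1 : Int) else 0) - (if dr < 0 then 1 else 0)),
     ((if dc > 0 then (1 : Int) else 0) - (if dc < 0 then 1 else 0))) ∈ dirs8 := by
  split_ifs <;>
    refine ⟨?_, ?_, ?_, ?_⟩ <;>
    first
      | (exfalso; omega)
      | (simp only [Int.abs_eq_natAbs] at hal ⊢; omega)
      | (simp only [Int.abs_eq_natAbs] at hal ⊢; norm_num; omega)
      | (exfalso; simp only [Int.abs_eq_natAbs] at hal ⊢; omega)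
      | (norm_num [dirs8])

lemma hcond_to_gcond (p : Int × Int) (hp : p ∈ dirs8) (dr dc D : Int)
    (hD : D = max |dr| |dc|) (h1 : dr = D * p.1) (h2 : dc = D * p.2) (h3 : 2 ≤ D) :
    ¬(dr = 0 ∧ dc = 0) ∧ (dr = 0 ∨ dc = 0 ∨ |dr| = |dc|) ∧
    ((if dr > 0 then (1 : Int) else 0) - (if dr < 0 then 1 else 0)) = p.1 ∧
    ((if dc > 0 then (1 : Int) else 0) - (if dc < 0 then 1 else 0)) = p.2 := by
  obtain ⟨hi, hj, hnz⟩ := mem_dirs8 p.1 p.2 hp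
  rcases hi with h | h | h <;> rcases hj with h' | h' | h' <;>
    rw [h] at h1 <;> rw [h'] at h2 <;> rw [h, h'] <;>
    norm_num at h1 h2 ⊢ <;>
    [skip; skip; skip; skip; exact absurd ⟨h, h'⟩ hnz; skip; skip; skip; skip] <;>
    refine ⟨by omega, by simp only [Int.abs_eq_natAbs] at hD ⊢; omega,
      by split_ifs <;> omega, by split_ifs <;> omega⟩

lemma gcell_eq_sum (board : List (List String)) (row col : Int) (colour : String) (r c : Int) :
    gcell board row col colour r c
      = (dirs8.map (fun p => hcell board row col colour p r c)).sum := by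
  unfold gcell
  by_cases hb1 : ((cellA board r c == colour) && !((r - row) == 0 && (c - col) == 0) &&
      (((r - row) == 0) || ((c - col) == 0) || (|r - row| == |c - col|))) = true
  · rw [if_pos hb1]
    by_cases hb2 : (decide (2 ≤ max |r - row| |c - col|) &&
        (PySem.List.pyRange 1 (max |r - row| |c - col|) 1).all (fun k =>
          cellA board (row + k * ((if r - row > 0 then (1 : Int) else 0) - (if r - row < 0 then 1 else 0)))
                      (col + k * ((if c - col > 0 then (1 : Int) else 0) - (if c - col < 0 then 1 else 0))) == opp colour)) = true
    · -- aligned own-colour cell with an all-opponent gap: one direction gets d-1, the rest 0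
      rw [if_pos hb2]
      simp only [Bool.and_eq_true, Bool.or_eq_true, Bool.not_eq_true', Bool.and_eq_false_iff,
        beq_iff_eq, beq_eq_false_iff_ne, decide_eq_true_eq] at hb1 hb2
      obtain ⟨⟨hcol, hnz'⟩, hal'⟩ := hb1
      have hnz : ¬(r - row = 0 ∧ c - col = 0) := by
        rcases hnz' with h | h
        · intro hx; exact h hx.1
        · intro hx; exact h hx.2
      obtain ⟨hd1, hdr, hdc, hmem⟩ := align_repr (r - row) (c - col) hnz (or_assoc.mp hal')
      rw [sum_single dirs8 _ _ hmem (by decide) ?_]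
      · unfold hcell
        rw [if_pos ⟨by rw [← hdr]; ring, by rw [← hdc]; ring, hb2.1, hcol, hb2.2⟩]
      · intro p hpd hneq
        unfold hcell
        apply if_neg
        rintro ⟨g1, g2, g3, g4, g5⟩
        apply hneq
        have hD0 : (max |r - row| |c - col| : Int) ≠ 0 := by omega
        have e1 : (max |r - row| |c - col|) * p.1 = (max |r - row| |c - col|) *
            ((if r - row > 0 then (1 : Int) else 0) - (if r - row < 0 then 1 else 0)) := by
          rw [← hdr, ← sub_eq_iff_eq_add'.mpr g1]
        have e2 : (max |r - row| |c - col|) * p.2 = (max |r - row| |c - col|) *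
            ((if c - col > 0 then (1 : Int) else 0) - (if c - col < 0 then 1 else 0)) := by
          rw [← hdc, ← sub_eq_iff_eq_add'.mpr g2]
        exact Prod.ext (mul_left_cancel₀ hD0 e1) (mul_left_cancel₀ hD0 e2)
    · -- gap test fails: no direction can claim the cell
      rw [if_neg hb2]
      symm
      apply sum_zero'
      intro p hpd
      unfold hcell
      apply if_neg
      rintro ⟨g1, g2, g3, g4, g5⟩
      obtain ⟨gnz, gal, gie, gje⟩ := hcond_to_gcond p hpd (r - row) (c - col)
        (max |r - row| |c - col|) rfl (sub_eq_iff_eq_add'.mpr g1) (sub_eq_iff_eq_add'.mpr g2) g3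
      rw [← gie, ← gje] at g5
      apply hb2
      simp only [Bool.and_eq_true, decide_eq_true_eq]
      exact ⟨g3, g5⟩
  · -- not an aligned own-colour cell: no direction can claim it either
    rw [if_neg hb1]
    symm
    apply sum_zero'
    intro p hpd
    unfold hcell
    apply if_neg
    rintro ⟨g1, g2, g3, g4, g5⟩
    obtain ⟨gnz, gal, gie, gje⟩ := hcond_to_gcond p hpd (r - row) (c - col)
      (max |r - row| |c - col|) rfl (sub_eq_iff_eq_add'.mpr g1) (sub_eq_iff_eq_add'.mpr g2) g3
    apply hb1
    simp only [Bool.and_eq_true, Bool.or_eq_true, Bool.not_eq_true', Bool.and_eq_false_iff,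
      beq_iff_eq, beq_eq_false_iff_ne]
    refine ⟨⟨g4, ?_⟩, or_assoc.mpr gal⟩
    by_cases h : r - row = 0
    · right; intro h'; exact gnz ⟨h, h'⟩
    · left; exact h

-- ===== assembling the two sides =====

lemma ite_add_shape2 (b1 b2 : Bool) (t X : Int) :
    (if b1 then (if b2 then t + X else t) else t)
      = t + (if b1 then (if b2 then X else 0) else 0) := by
  cases b1 <;> cases b2 <;> simp

lemma ite_add_shape1 (b : Bool) (t X : Int) :
    (if b then t + X else t) = t + (if b then X else 0) := by
  cases b <;> simp

lemma B_eq_sum (board : List (List String)) (n row col : Int) (colour : String) :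
    positionScore_alt board n row col colour
      = if !(inB n row col) || (cellA board row col != "U") then 0
        else ((PySem.List.pyRange 0 n 1).map (fun r =>
          ((PySem.List.pyRange 0 n 1).map (fun c => gcell board row col colour r c)).sum)).sum := by
  have hIn : ∀ (r t c : Int),
      (fun tiles c =>
        let dr := r - row
        let dc := c - col
        if (cellA board r c == colour) && !(dr == 0 && dc == 0) &&
           ((dr == 0) || (dc == 0) || (|dr| == |dc|)) then
          let d := max |dr| |dc|
          let i := (if dr > 0 then (1 : Int) else 0) - (if dr < 0 then 1 else 0)
          let j := (if dc > 0 then (1 : Int) else 0) - (if dc < 0 then 1 else 0)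
          if decide (2 ≤ d) &&
             (PySem.List.pyRange 1 d 1).all (fun k =>
               cellA board (row + k * i) (col + k * j) == opp colour)
          then tiles + (d - 1) else tiles
        else tiles) t c = t + gcell board row col colour r c := by
    intro r t c
    show (if (cellA board r c == colour) && !((r - row) == 0 && (c - col) == 0) &&
           (((r - row) == 0) || ((c - col) == 0) || (|r - row| == |c - col|)) then
          if decide (2 ≤ max |r - row| |c - col|) &&
             (PySem.List.pyRange 1 (max |r - row| |c - col|) 1).all (fun k =>
               cellA board (row + k * ((if r - row > 0 then (1 : Int) else 0) - (if r - row < 0 then 1 else 0)))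
                           (col + k * ((if c - col > 0 then (1 : Int) else 0) - (if c - col < 0 then 1 else 0))) == opp colour)
          then t + (max |r - row| |c - col| - 1) else t
        else t) = t + gcell board row col colour r c
    unfold gcell
    exact ite_add_shape2 _ _ _ _
  unfold positionScore_alt
  rcases Bool.eq_false_or_eq_true (!(inB n row col) || (cellA board row col != "U")) with hgd | hgd
  · simp [hgd]
  · simp only [hgd, Bool.false_eq_true, if_false]
    exact ((foldl_abs _ _ _ (fun t r => (foldl_abs _ _ _ (fun t' c => hIn r t' c)) t)) 0).trans
      (zero_add _)

lemma mid_eq_sum (board : List (List String)) (n row col : Int) (colour : String) :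
    midScore board n row col colour
      = if !(inB n row col) || (cellA board row col != "U") then 0
        else (dirs8.map (fun p => contribD board n row col colour p)).sum := by
  have hM : ∀ (t : Int) (p : Int × Int),
      (fun tiles (d : Int × Int) =>
        let w := runLoop board n (opp colour) d.1 d.2 (n.toNat + 1) (row + d.1) (col + d.2) 0
        if decide (w.1 > 0) && inB n w.2.1 w.2.2 && (cellA board w.2.1 w.2.2 == colour)
        then tiles + w.1 else tiles) t p = t + contribD board n row col colour p := by
    intro t p
    show (if decide ((runLoop board n (opp colour) p.1 p.2 (n.toNat + 1) (row + p.1) (col + p.2) 0).1 > 0) &&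
            inB n (runLoop board n (opp colour) p.1 p.2 (n.toNat + 1) (row + p.1) (col + p.2) 0).2.1
                  (runLoop board n (opp colour) p.1 p.2 (n.toNat + 1) (row + p.1) (col + p.2) 0).2.2 &&
            (cellA board (runLoop board n (opp colour) p.1 p.2 (n.toNat + 1) (row + p.1) (col + p.2) 0).2.1
                         (runLoop board n (opp colour) p.1 p.2 (n.toNat + 1) (row + p.1) (col + p.2) 0).2.2 == colour)
          then t + (runLoop board n (opp colour) p.1 p.2 (n.toNat + 1) (row + p.1) (col + p.2) 0).1 else t)
        = t + contribD board n row col colour p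
    unfold contribD
    exact ite_add_shape1 _ _ _
  unfold midScore
  rcases Bool.eq_false_or_eq_true (!(inB n row col) || (cellA board row col != "U")) with hgd | hgd
  · simp [hgd]
  · simp only [hgd, Bool.false_eq_true, if_false]
    exact ((foldl_abs _ _ _ hM) 0).trans (zero_add _)

-- ===== VERDICT (by name: the statement is the Claim_ definition above) =====
theorem positionScore_spec : Claim_equal_positionScore := by
  unfold Claim_equal_positionScore
  intro board n row col colour _hdom _hpre
  unfold Spec_positionScore
  rw [A_eq_mid, mid_eq_sum, B_eq_sum]
  rcases Bool.eq_false_or_eq_true (!(inB n row col) || (cellA board row col != "U")) with hgd | hgd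
  · simp only [hgd, if_true]
  · simp only [hgd, Bool.false_eq_true, if_false]
    have hg : inB n row col = true := by
      rcases Bool.or_eq_false_iff.mp hgd with ⟨h1, _⟩
      simpa using h1
    calc (dirs8.map (fun p => contribD board n row col colour p)).sum
        = (dirs8.map (fun p => ((PySem.List.pyRange 0 n 1).map (fun r =>
            ((PySem.List.pyRange 0 n 1).map (fun c => hcell board row col colour p r c)).sum)).sum)).sum := by
          exact (map_sum_congr _ _ _ (fun p hp => dir_sum board n row col colour p hp hg)).symm
      _ = ((PySem.List.pyRange 0 n 1).map (fun r => (dirs8.map (fun p =>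
            ((PySem.List.pyRange 0 n 1).map (fun c => hcell board row col colour p r c)).sum)).sum)).sum := by
          exact sum_comm' dirs8 (PySem.List.pyRange 0 n 1) _
      _ = ((PySem.List.pyRange 0 n 1).map (fun r => ((PySem.List.pyRange 0 n 1).map (fun c =>
            (dirs8.map (fun p => hcell board row col colour p r c)).sum)).sum)).sum := by
          exact map_sum_congr _ _ _ (fun r _ => sum_comm' dirs8 (PySem.List.pyRange 0 n 1) _)
      _ = ((PySem.List.pyRange 0 n 1).map (fun r => ((PySem.List.pyRange 0 n 1).map (fun c =>
            gcell board row col colour r c)).sum)).sum := by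
          exact map_sum_congr _ _ _ (fun r _ => map_sum_congr _ _ _ (fun c _ =>
            (gcell_eq_sum board row col colour r c).symm))
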